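-- pv_equiv track=rewrite | github.com/thijsfranck/advent-of-code-2023 | advent_of_code_2023/day13/part2.py | find_reflection
-- ===== SOURCE A (Python) =====
-- from itertools import pairwise
--
-- def hamming_distance(a: str, b: str) -> int:
--     """Calculate the hamming distance between two strings."""
--     return sum(1 for x, y in zip(a, b, strict=True) if x != y)
--
-- def find_reflection(pattern: list[str], allowed_smudges: int = 1) -> int:
--     """Check a pattern for reflections."""
--     for index, (a, b) in enumerate(pairwise(pattern)):
--         smudges_remaining = allowed_smudges - hamming_distance(a, b)
--
--         if smudges_remaining < 0:
--             continue
--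
--         for offset in range(1, min(index + 1, len(pattern) - index - 1)):
--             smudges_remaining -= hamming_distance(
--                 pattern[index + 1 + offset], pattern[index - offset],
--             )
--
--             if smudges_remaining < 0:
--                 break
--         else:
--             if smudges_remaining == 0:
--                 return index + 1
--
--     return 0
-- ===== SOURCE B (Python) =====
-- def hamming_distance(a: str, b: str) -> int:
--     """Calculate the hamming distance between two strings."""
--     return sum(1 for x, y in zip(a, b, strict=True) if x != y)
--
--
-- def find_reflection(pattern: list[str], allowed_smudges: int = 1) -> int:
--     """Check a pattern for reflections."""
--     n = len(pattern)
--     # One pass over all row pairs an odd distance apart, accumulating each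
--     # pair's hamming distance into the table entry of the axis it mirrors
--     # across; then scan the axes left to right for an exact smudge total.
--     totals = [0] * n
--     for j in range(n):
--         for k in range(j + 1, n, 2):
--             totals[(j + k + 1) // 2] += hamming_distance(pattern[j], pattern[k])
--     for axis in range(1, n):
--         if totals[axis] == allowed_smudges:
--             return axis
--     return 0
-- ===== Notes on version B (the rewrite author's own statement) =====
-- stated objective: alternative
-- what changed: Instead of testing each axis by expanding mirrored pairs outward with a decrementing short-circuited smudge counter, B makes one pass over all row pairs an odd distance apart, accumulating each pair's Hamming distance into an axis-indexed table (axis = (j+k+1)//2), then scans the table left to right for the first axis whose total equals allowed_smudges.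
-- outside the precondition, e.g. on find_reflection(['a', 'a', 'bc'], 0): A returns 1, B raises ValueError
import Mathlib
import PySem

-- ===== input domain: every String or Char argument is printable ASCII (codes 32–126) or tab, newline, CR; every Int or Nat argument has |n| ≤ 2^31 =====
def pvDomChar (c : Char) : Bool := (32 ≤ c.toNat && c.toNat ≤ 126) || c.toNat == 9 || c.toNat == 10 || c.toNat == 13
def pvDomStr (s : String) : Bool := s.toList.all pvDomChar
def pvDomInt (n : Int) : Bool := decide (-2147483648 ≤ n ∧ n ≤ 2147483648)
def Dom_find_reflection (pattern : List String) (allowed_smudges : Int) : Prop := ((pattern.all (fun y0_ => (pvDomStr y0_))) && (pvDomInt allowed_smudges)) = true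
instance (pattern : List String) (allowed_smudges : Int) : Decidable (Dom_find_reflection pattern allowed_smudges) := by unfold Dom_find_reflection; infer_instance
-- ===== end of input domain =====

-- Header: instead of A's per-axis outward expansion with a decrementing short-circuited
-- smudge counter, B makes one pass over all row pairs an odd distance apart, accumulating
-- each pair's Hamming distance into an axis-indexed table, then scans the table for the
-- first axis whose total equals allowed_smudges (objective: alternative).

-- ===== PORT A =====
-- hamming_distance: sum(1 for x, y in zip(a, b, strict=True) if x != y).
-- Ported with a truncating zip; exact whenever the two rows have equal length,
-- which Pre_find_reflection guarantees for every pair either program compares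
-- (Python's strict zip raises ValueError on unequal lengths — excluded by Pre_).
def pvHam (a b : String) : Int :=
  (a.toList.zip b.toList).foldl (fun acc q => if q.1 ≠ q.2 then acc + 1 else acc) 0

-- inner 'for offset in range(1, min(index+1, len-index-1))' with the break flag:
-- returns (smudges_remaining, broke?)
def pvInnerA (pattern : List String) (index : Int) : List Int → Int → Int × Bool
  | [], r => (r, false)
  | off :: rest, r =>
    let r' := r - pvHam (PySem.List.pyGetD pattern (index + 1 + off) "")
                        (PySem.List.pyGetD pattern (index - off) "")
    if r' < 0 then (r', true) else pvInnerA pattern index rest r'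

-- outer 'for index, (a, b) in enumerate(pairwise(pattern))' as recursion over
-- the adjacent pairs, carrying the enumeration index
def pvOuterA (pattern : List String) (allowed : Int) : Int → List (String × String) → Int
  | _, [] => 0
  | index, (a, b) :: rest =>
    let r0 := allowed - pvHam a b
    if r0 < 0 then pvOuterA pattern allowed (index + 1) rest
    else
      let s := pvInnerA pattern index
        (PySem.List.pyRange 1 (min (index + 1) ((pattern.length : Int) - index - 1)) 1) r0
      if s.2 = false ∧ s.1 = 0 then index + 1
      else pvOuterA pattern allowed (index + 1) rest

def find_reflection (pattern : List String) (allowed_smudges : Int) : Int :=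
  pvOuterA pattern allowed_smudges 0 (pattern.zip pattern.tail)

-- ===== PORT B =====
-- axis = (j + k + 1) // 2; always ≥ 1 where used (j ≥ 0, k ≥ j + 1), so toNat is exact
def pvAxis (j k : Int) : Nat := (PySem.Int.floordiv (j + k + 1) 2).toNat

-- inner 'for k in range(j + 1, n, 2): totals[axis] += hamming_distance(...)'
-- (axis is always in range here, so List.set is Python's in-place totals[axis] = …)
def pvInnerB (pattern : List String) (j : Int) (totals : List Int) : List Int :=
  (PySem.List.pyRange (j + 1) (pattern.length : Int) 2).foldl
    (fun totals k =>
      totals.set (pvAxis j k)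
        (totals.getD (pvAxis j k) 0 +
          pvHam (PySem.List.pyGetD pattern j "") (PySem.List.pyGetD pattern k "")))
    totals

-- totals = [0] * n; for j in range(n): inner loop
def pvBuildTotals (pattern : List String) : List Int :=
  (PySem.List.pyRange 0 (pattern.length : Int) 1).foldl
    (fun totals j => pvInnerB pattern j totals)
    (List.replicate pattern.length 0)

-- 'for axis in range(1, n): if totals[axis] == allowed_smudges: return axis'
def pvScanB (totals : List Int) (allowed : Int) : List Int → Int
  | [] => 0
  | i :: rest =>
    if PySem.List.pyGetD totals i 0 = allowed then i else pvScanB totals allowed rest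

def find_reflection_alt (pattern : List String) (allowed_smudges : Int) : Int :=
  pvScanB (pvBuildTotals pattern) allowed_smudges
    (PySem.List.pyRange 1 (pattern.length : Int) 1)

-- ===== PRECONDITION & SPEC =====
-- Pre_ requires all rows to have equal length: on ragged patterns hamming_distance's
-- zip(strict=True) raises ValueError on the first compared unequal pair, and which pairs
-- get compared depends on each algorithm's traversal order/short-circuiting, so Pre_
-- conservatively excludes all ragged patterns, including some on which A happens to
-- return before reaching an unequal pair (see the cite in the claim).
def Pre_find_reflection (pattern : List String) (allowed_smudges : Int) : Prop :=
  ∀ a ∈ pattern, ∀ b ∈ pattern, a.length = b.length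
instance (pattern : List String) (allowed_smudges : Int) : Decidable (Pre_find_reflection pattern allowed_smudges) := by unfold Pre_find_reflection; infer_instance

def pvWitness_find_reflection : List String × Int := (["#.", "..", "..", "#."], 0)

def Spec_find_reflection (pattern : List String) (allowed_smudges : Int) (out : Int) : Prop := out = find_reflection_alt pattern allowed_smudges
instance (pattern : List String) (allowed_smudges : Int) (out : Int) : Decidable (Spec_find_reflection pattern allowed_smudges out) := by unfold Spec_find_reflection; infer_instance

-- ===== CLAIM (what is proved, stated in full; the proofs are below) =====
def Claim_equal_find_reflection : Prop := ∀ (pattern : List String) (allowed_smudges : Int), Dom_find_reflection pattern allowed_smudges → Pre_find_reflection pattern allowed_smudges → Spec_find_reflection pattern allowed_smudges (find_reflection pattern allowed_smudges)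

-- ===== LEMMAS AND PROOFS =====

theorem pvHam_foldl (l : List (Char × Char)) : ∀ (c : Int),
    l.foldl (fun acc q => if q.1 ≠ q.2 then acc + 1 else acc) c
      = c + (l.countP (fun q => decide (q.1 ≠ q.2)) : Int) := by
  induction l with
  | nil => simp
  | cons x xs ih =>
    intro c
    simp only [List.foldl_cons, List.countP_cons, ih]
    by_cases h : x.1 ≠ x.2 <;> simp [h] <;> ring

theorem pvHam_eq_countP (a b : String) :
    pvHam a b = ((a.toList.zip b.toList).countP (fun q => decide (q.1 ≠ q.2)) : Int) := by
  unfold pvHam; rw [pvHam_foldl]; ring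

theorem pvHam_nonneg (a b : String) : 0 ≤ pvHam a b := by
  rw [pvHam_eq_countP]; positivity

theorem pvHam_comm (a b : String) : pvHam a b = pvHam b a := by
  rw [pvHam_eq_countP, pvHam_eq_countP]
  rw [← List.zip_swap b.toList a.toList, List.countP_map]
  congr 1
  apply List.countP_congr
  intro q _
  simp [Function.comp, ne_comm]

theorem pvInnerA_spec (p : List String) (index : Int) :
    ∀ (l : List Int) (r : Int), 0 ≤ r →
      (((pvInnerA p index l r).2 = false ∧ (pvInnerA p index l r).1 = 0) ↔
        r = (l.map (fun off => pvHam (PySem.List.pyGetD p (index + 1 + off) "")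
                                     (PySem.List.pyGetD p (index - off) ""))).sum) := by
  intro l
  induction l with
  | nil => intro r hr; simp [pvInnerA]
  | cons off rest ih =>
    intro r hr
    set d := pvHam (PySem.List.pyGetD p (index + 1 + off) "") (PySem.List.pyGetD p (index - off) "") with hd
    have hdpos : 0 ≤ d := pvHam_nonneg _ _
    have hsum : 0 ≤ (rest.map (fun off => pvHam (PySem.List.pyGetD p (index + 1 + off) "")
                                     (PySem.List.pyGetD p (index - off) ""))).sum := by
      apply List.sum_nonneg
      intro x hx
      simp only [List.mem_map] at hx
      obtain ⟨o, _, rfl⟩ := hx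
      exact pvHam_nonneg _ _
    by_cases hneg : r - d < 0
    · rw [pvInnerA]
      simp only [← hd, if_pos hneg, List.map_cons, List.sum_cons]
      constructor
      · rintro ⟨h, -⟩; simp at h
      · intro h; omega
    · rw [pvInnerA]
      simp only [← hd, if_neg hneg]
      rw [ih (r - d) (by omega)]
      simp only [List.map_cons, List.sum_cons]
      omega

theorem pvFold_length (g : Int → Nat) (v : Int → Int) :
    ∀ (L : List Int) (t : List Int),
    (L.foldl (fun t k => t.set (g k) (t.getD (g k) 0 + v k)) t).length = t.length := by
  intro L
  induction L with
  | nil => intro t; rfl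
  | cons a L ih => intro t; rw [List.foldl_cons, ih]; simp

theorem pvInnerB_length (p : List String) (j : Int) (t : List Int) :
    (pvInnerB p j t).length = t.length := by
  unfold pvInnerB
  exact pvFold_length _ _ _ t

theorem pvFold_getD (g : Int → Nat) (v : Int → Int) :
    ∀ (L : List Int) (t : List Int) (i : Nat), i < t.length →
    (L.foldl (fun t k => t.set (g k) (t.getD (g k) 0 + v k)) t).getD i 0
      = t.getD i 0 + (L.map (fun k => if g k = i then v k else 0)).sum := by
  intro L
  induction L with
  | nil => intro t i hi; simp
  | cons a L ih =>
    intro t i hi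
    rw [List.foldl_cons, ih _ i (by simpa using hi), List.map_cons, List.sum_cons]
    by_cases h : g a = i
    · subst h
      rw [List.getD_eq_getElem _ _ (by simpa using hi), List.getElem_set_self (by simpa using hi)]
      rw [List.getD_eq_getElem _ _ hi]
      simp
      ring
    · rw [if_neg h]
      have : (t.set (g a) (t.getD (g a) 0 + v a)).getD i 0 = t.getD i 0 := by
        rw [List.getD_eq_getElem _ _ (by simpa using hi), List.getElem_set_ne (by omega)]
        rw [List.getD_eq_getElem _ _ hi]
      rw [this]; ring

theorem pvInnerB_getD (p : List String) (j : Int) (t : List Int) (i : Nat) (hi : i < t.length) :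
    (pvInnerB p j t).getD i 0
      = t.getD i 0 +
        ((PySem.List.pyRange (j + 1) (p.length : Int) 2).map
          (fun k => if pvAxis j k = i then
              pvHam (PySem.List.pyGetD p j "") (PySem.List.pyGetD p k "") else 0)).sum := by
  unfold pvInnerB
  exact pvFold_getD _ _ _ t i hi

theorem pvSum_ite_single (L : List Int) (c : Int) (v : Int → Int) (h : L.Nodup) :
    (L.map (fun x => if x = c then v x else 0)).sum = if c ∈ L then v c else 0 := by
  induction L with
  | nil => simp
  | cons a L ih =>
    rw [List.nodup_cons] at h
    rw [List.map_cons, List.sum_cons, ih h.2]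
    by_cases hac : a = c
    · subst hac
      rw [if_pos rfl, if_neg h.1, if_pos (List.mem_cons_self)]
      ring
    · rw [if_neg hac]
      by_cases hc : c ∈ L
      · rw [if_pos hc, if_pos (List.mem_cons_of_mem _ hc)]; ring
      · rw [if_neg hc, if_neg (by simp [hac, hc, Ne.symm])]; ring

theorem pvNodup_pyRange2 (a b : Int) : (PySem.List.pyRange a b 2).Nodup := by
  rw [PySem.List.pyRange_of_pos a b (show (0:Int) < 2 by norm_num)]
  apply List.Nodup.map _ (List.nodup_range)
  intro x y hxy
  simp only [] at hxy
  omega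

theorem pvAxis_eq_iff (j k : Int) (i : Nat) (hj : 0 ≤ j) (hk : j + 1 ≤ k)
    (hpar : (2 : Int) ∣ k - (j + 1)) (hi : 1 ≤ i) :
    pvAxis j k = i ↔ k = 2 * (i : Int) - 1 - j := by
  unfold pvAxis
  rw [PySem.Int.floordiv_eq_ediv_of_pos (by norm_num)]
  omega

theorem pvListSum_range (N : Nat) (f : Nat → Int) :
    ((List.range N).map f).sum = ∑ t ∈ Finset.range N, f t := by
  induction N with
  | zero => simp
  | succ n ih => rw [List.range_succ, Finset.sum_range_succ, List.map_append, List.sum_append, ih]; simp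

theorem pvInnerSum_eval (p : List String) (j : Int) (i : Nat) (hj : 0 ≤ j) (hi : 1 ≤ i) :
    ((PySem.List.pyRange (j + 1) (p.length : Int) 2).map
      (fun k => if pvAxis j k = i then
          pvHam (PySem.List.pyGetD p j "") (PySem.List.pyGetD p k "") else 0)).sum
      = if j + 1 ≤ 2 * (i : Int) - 1 - j ∧ 2 * (i : Int) - 1 - j < (p.length : Int) then
          pvHam (PySem.List.pyGetD p j "") (PySem.List.pyGetD p (2 * (i : Int) - 1 - j) "")
        else 0 := by
  have hcong : ∀ k ∈ PySem.List.pyRange (j + 1) (p.length : Int) 2,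
      (if pvAxis j k = i then
          pvHam (PySem.List.pyGetD p j "") (PySem.List.pyGetD p k "") else 0)
        = (if k = (2 * (i : Int) - 1 - j) then pvHam (PySem.List.pyGetD p j "") (PySem.List.pyGetD p k "") else 0) := by
    intro k hk
    rw [PySem.List.mem_pyRange_iff_of_pos (by norm_num)] at hk
    simp only [pvAxis_eq_iff j k i hj hk.1 hk.2.2 hi]
  rw [List.map_congr_left hcong,
      pvSum_ite_single _ (2 * (i : Int) - 1 - j) _ (pvNodup_pyRange2 _ _)]
  by_cases hcc : j + 1 ≤ (2 * (i : Int) - 1 - j) ∧ (2 * (i : Int) - 1 - j) < (p.length : Int)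
  · rw [if_pos hcc, if_pos ((PySem.List.mem_pyRange_iff_of_pos (by norm_num) (2 * (i : Int) - 1 - j)).mpr
      ⟨hcc.1, hcc.2, ⟨(i : Int) - j - 1, by omega⟩⟩)]
  · rw [if_neg hcc, if_neg (fun hm => hcc (by
      rw [PySem.List.mem_pyRange_iff_of_pos (by norm_num)] at hm
      exact ⟨hm.1, hm.2.1⟩))]

theorem pvBuild_getD (p : List String) : ∀ (J : List Int) (t : List Int) (i : Nat), i < t.length →
    ((J.foldl (fun t j => pvInnerB p j t) t).getD i 0)
      = t.getD i 0 +
        (J.map (fun j =>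
          ((PySem.List.pyRange (j + 1) (p.length : Int) 2).map
            (fun k => if pvAxis j k = i then
                pvHam (PySem.List.pyGetD p j "") (PySem.List.pyGetD p k "") else 0)).sum)).sum := by
  intro J
  induction J with
  | nil => intro t i hi; simp
  | cons a J ih =>
    intro t i hi
    rw [List.foldl_cons, ih _ i (by rw [pvInnerB_length]; exact hi),
        pvInnerB_getD p a t i hi, List.map_cons, List.sum_cons]
    ring

theorem pvTotals_decomp (p : List String) (k : Nat) (hk : k + 1 < p.length) :
    PySem.List.pyGetD (pvBuildTotals p) ((k : Int) + 1) 0 =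
      pvHam (p.getD k "") (p.getD (k + 1) "") +
      ((PySem.List.pyRange 1 (min ((k : Int) + 1) ((p.length : Int) - k - 1)) 1).map
        (fun off => pvHam (PySem.List.pyGetD p ((k : Int) + 1 + off) "")
                          (PySem.List.pyGetD p ((k : Int) - off) ""))).sum := by
  have hcast : ((k : Int) + 1) = ((k + 1 : Nat) : Int) := by push_cast; ring
  rw [hcast, PySem.List.pyGetD_natCast]
  unfold pvBuildTotals
  rw [pvBuild_getD p _ _ (k + 1) (by simp; omega)]
  have hrep : (List.replicate p.length (0:Int)).getD (k + 1) 0 = 0 := by simp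
  rw [hrep]
  -- evaluate each inner sum
  have hcong : ∀ j ∈ PySem.List.pyRange 0 (p.length : Int) 1,
      ((PySem.List.pyRange (j + 1) (p.length : Int) 2).map
        (fun k' => if pvAxis j k' = k + 1 then
            pvHam (PySem.List.pyGetD p j "") (PySem.List.pyGetD p k' "") else 0)).sum
      = (if j + 1 ≤ 2 * ((k + 1 : Nat) : Int) - 1 - j ∧
            2 * ((k + 1 : Nat) : Int) - 1 - j < (p.length : Int) then
          pvHam (PySem.List.pyGetD p j "")
                (PySem.List.pyGetD p (2 * ((k + 1 : Nat) : Int) - 1 - j) "")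
        else 0) := by
    intro j hj
    rw [PySem.List.mem_pyRange_one] at hj
    exact pvInnerSum_eval p j (k + 1) hj.1 (by omega)
  rw [List.map_congr_left hcong]
  push_cast
  -- split the j-range at lo := max 0 (2(k+1)-n) and at k+1
  rw [PySem.List.pyRange_one_append 0 (max 0 (2*((k:Int)+1) - (p.length:Int))) (p.length:Int)
        (by omega) (by omega),
      PySem.List.pyRange_one_append (max 0 (2*((k:Int)+1) - (p.length:Int))) ((k:Int)+1)
        (p.length:Int) (by omega) (by omega),
      List.map_append, List.map_append, List.sum_append, List.sum_append]
  have hz1 : ((PySem.List.pyRange 0 (max 0 (2*((k:Int)+1) - (p.length:Int))) 1).map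
      (fun j => if j + 1 ≤ 2 * ((k:Int)+1) - 1 - j ∧ 2 * ((k:Int)+1) - 1 - j < (p.length : Int) then
          pvHam (PySem.List.pyGetD p j "") (PySem.List.pyGetD p (2 * ((k:Int)+1) - 1 - j) "")
        else 0)).sum = 0 := by
    apply List.sum_eq_zero
    intro x hx
    obtain ⟨j0, hj0, rfl⟩ := List.mem_map.mp hx
    rw [PySem.List.mem_pyRange_one] at hj0
    rw [if_neg (by omega)]
  have hz3 : ((PySem.List.pyRange ((k:Int)+1) (p.length:Int) 1).map
      (fun j => if j + 1 ≤ 2 * ((k:Int)+1) - 1 - j ∧ 2 * ((k:Int)+1) - 1 - j < (p.length : Int) then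
          pvHam (PySem.List.pyGetD p j "") (PySem.List.pyGetD p (2 * ((k:Int)+1) - 1 - j) "")
        else 0)).sum = 0 := by
    apply List.sum_eq_zero
    intro x hx
    obtain ⟨j0, hj0, rfl⟩ := List.mem_map.mp hx
    rw [PySem.List.mem_pyRange_one] at hj0
    rw [if_neg (by omega)]
  rw [hz1, hz3]
  have hmid : ∀ j ∈ PySem.List.pyRange (max 0 (2*((k:Int)+1) - (p.length:Int))) ((k:Int)+1) 1,
      (if j + 1 ≤ 2 * ((k:Int)+1) - 1 - j ∧ 2 * ((k:Int)+1) - 1 - j < (p.length : Int) then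
          pvHam (PySem.List.pyGetD p j "") (PySem.List.pyGetD p (2 * ((k:Int)+1) - 1 - j) "")
        else 0)
      = pvHam (PySem.List.pyGetD p j "") (PySem.List.pyGetD p (2 * ((k:Int)+1) - 1 - j) "") := by
    intro j hj
    rw [PySem.List.mem_pyRange_one] at hj
    rw [if_pos (by omega)]
  rw [List.map_congr_left hmid]
  -- turn the RHS into a single sum over pyRange 0 m 1
  have hm : (0:Int) < min ((k:Int)+1) ((p.length:Int) - k - 1) := by omega
  have hcons : PySem.List.pyRange 0 (min ((k:Int)+1) ((p.length:Int) - k - 1)) 1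
      = 0 :: PySem.List.pyRange 1 (min ((k:Int)+1) ((p.length:Int) - k - 1)) 1 := by
    simpa using PySem.List.pyRange_one_cons (a := 0)
      (b := min ((k:Int)+1) ((p.length:Int) - k - 1)) hm
  have hrhs : pvHam (p.getD k "") (p.getD (k + 1) "") +
      ((PySem.List.pyRange 1 (min ((k : Int) + 1) ((p.length : Int) - k - 1)) 1).map
        (fun off => pvHam (PySem.List.pyGetD p ((k : Int) + 1 + off) "")
                          (PySem.List.pyGetD p ((k : Int) - off) ""))).sum
      = ((PySem.List.pyRange 0 (min ((k : Int) + 1) ((p.length : Int) - k - 1)) 1).map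
        (fun off => pvHam (PySem.List.pyGetD p ((k : Int) + 1 + off) "")
                          (PySem.List.pyGetD p ((k : Int) - off) ""))).sum := by
    rw [hcons, List.map_cons, List.sum_cons]
    congr 1
    rw [add_zero, sub_zero]
    rw [show ((k:Int) + 1) = ((k + 1 : Nat) : Int) by push_cast; ring,
        PySem.List.pyGetD_natCast, PySem.List.pyGetD_natCast, pvHam_comm]
  rw [hrhs]
  -- both are sums of m terms; reflect and match termwise
  rw [PySem.List.pyRange_one (max 0 (2*((k:Int)+1) - (p.length:Int))) ((k:Int)+1),
      PySem.List.pyRange_one 0 (min ((k:Int)+1) ((p.length:Int) - k - 1)),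
      List.map_map, List.map_map, pvListSum_range, pvListSum_range]
  have hNN : ((k:Int)+1 - max 0 (2*((k:Int)+1) - (p.length:Int))).toNat
      = (min ((k:Int)+1) ((p.length:Int) - k - 1) - 0).toNat := by omega
  rw [hNN, ← Finset.sum_range_reflect]
  simp only [zero_add, add_zero]
  apply Finset.sum_congr rfl
  intro t ht
  simp only [Finset.mem_range] at ht
  simp only [Function.comp]
  rw [pvHam_comm]
  have e1 : 2 * ((k:Int)+1) - 1 - (max 0 (2*((k:Int)+1) - (p.length:Int)) +
      (((min ((k:Int)+1) ((p.length:Int) - k - 1) - 0).toNat - 1 - t : Nat) : Int))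
      = (k:Int) + 1 + ((0:Int) + (t:Int)) := by omega
  have e2 : max 0 (2*((k:Int)+1) - (p.length:Int)) +
      (((min ((k:Int)+1) ((p.length:Int) - k - 1) - 0).toNat - 1 - t : Nat) : Int)
      = (k:Int) - ((0:Int) + (t:Int)) := by omega
  rw [e1, e2]
  norm_num

theorem pvOuter_eq_scan (p : List String) (allowed : Int) :
    ∀ (fuel k : Nat), p.length - k = fuel →
      pvOuterA p allowed (k : Int) ((p.drop k).zip (p.drop k).tail) =
        pvScanB (pvBuildTotals p) allowed (PySem.List.pyRange ((k : Int) + 1) (p.length : Int) 1) := by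
  intro fuel
  induction fuel with
  | zero =>
    intro k hfuel
    have hz : (p.drop k).zip (p.drop k).tail = [] := by
      apply List.eq_nil_of_length_eq_zero
      simp [List.length_zip]
      omega
    have hr : PySem.List.pyRange ((k : Int) + 1) (p.length : Int) 1 = [] := by
      apply PySem.List.pyRange_one_eq_nil
      omega
    rw [hz, hr]
    rfl
  | succ fuel ih =>
    intro k hfuel
    by_cases hk : k + 1 < p.length
    case neg =>
      have hz : (p.drop k).zip (p.drop k).tail = [] := by
        apply List.eq_nil_of_length_eq_zero
        simp [List.length_zip]
        omega
      have hr : PySem.List.pyRange ((k : Int) + 1) (p.length : Int) 1 = [] := by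
        apply PySem.List.pyRange_one_eq_nil
        omega
      rw [hz, hr]
      rfl
    case pos =>
      -- expose the head pair and the head axis
      have hd1 : p.drop k = p[k] :: p.drop (k + 1) := List.drop_eq_getElem_cons (by omega)
      have hd2 : p.drop (k + 1) = p[k + 1] :: p.drop (k + 2) := List.drop_eq_getElem_cons (by omega)
      have htail : (p.drop (k + 1)).tail = p.drop (k + 2) := by
        rw [List.tail_drop]
      have hz : (p.drop k).zip (p.drop k).tail =
          (p[k], p[k + 1]) :: ((p.drop (k + 1)).zip (p.drop (k + 2))) := by
        rw [hd1]
        simp only [List.tail_cons]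
        conv_lhs => rw [hd2]
        rw [List.zip_cons_cons]
        congr 1
        conv_lhs => rw [← hd2]
      have hr : PySem.List.pyRange ((k : Int) + 1) (p.length : Int) 1 =
          ((k : Int) + 1) :: PySem.List.pyRange ((k : Int) + 2) (p.length : Int) 1 := by
        have := PySem.List.pyRange_one_cons (a := (k : Int) + 1) (b := (p.length : Int)) (by omega)
        simpa [add_assoc] using this
      rw [hz, hr]
      -- the head axis total from B's table, in A's decomposed form
      set d0 := pvHam (p.getD k "") (p.getD (k + 1) "") with hd0
      set S := ((PySem.List.pyRange 1 (min ((k : Int) + 1) ((p.length : Int) - k - 1)) 1).map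
        (fun off => pvHam (PySem.List.pyGetD p ((k : Int) + 1 + off) "")
                          (PySem.List.pyGetD p ((k : Int) - off) ""))).sum with hS
      have hT : PySem.List.pyGetD (pvBuildTotals p) ((k : Int) + 1) 0 = d0 + S :=
        pvTotals_decomp p k hk
      have hd0nn : 0 ≤ d0 := pvHam_nonneg _ _
      have hSnn : 0 ≤ S := by
        rw [hS]
        apply List.sum_nonneg
        intro x hx
        simp only [List.mem_map] at hx
        obtain ⟨o, -, rfl⟩ := hx
        exact pvHam_nonneg _ _
      have hgk : p.getD k "" = p[k] := List.getD_eq_getElem _ _ (by omega)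
      have hgk1 : p.getD (k + 1) "" = p[k + 1] := List.getD_eq_getElem _ _ (by omega)
      have ihk := ih (k + 1) (by omega)
      have hcast : ((k + 1 : Nat) : Int) = (k : Int) + 1 := by push_cast; ring
      rw [hcast, htail, show (k : Int) + 1 + 1 = (k : Int) + 2 from by ring] at ihk
      -- evaluate both sides
      rw [pvOuterA, pvScanB]
      rw [hT]
      by_cases hfire : d0 + S = allowed
      case pos =>
        have hr0 : ¬ (allowed - pvHam p[k] p[k + 1] < 0) := by
          rw [← hgk, ← hgk1, ← hd0]
          omega
        rw [if_neg hr0, if_pos hfire]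
        have hinner : (pvInnerA p (k : Int)
            (PySem.List.pyRange 1 (min ((k : Int) + 1) ((p.length : Int) - (k : Int) - 1)) 1)
            (allowed - pvHam p[k] p[k + 1])).2 = false ∧
            (pvInnerA p (k : Int)
            (PySem.List.pyRange 1 (min ((k : Int) + 1) ((p.length : Int) - (k : Int) - 1)) 1)
            (allowed - pvHam p[k] p[k + 1])).1 = 0 := by
          rw [pvInnerA_spec p (k : Int) _ _ (by omega)]
          rw [← hgk, ← hgk1, ← hd0, ← hS]
          omega
        rw [if_pos hinner]
      case neg =>
        by_cases hr0 : allowed - pvHam p[k] p[k + 1] < 0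
        case pos =>
          rw [if_pos hr0, if_neg hfire]
          exact ihk
        case neg =>
          rw [if_neg hr0, if_neg hfire]
          have hinner : ¬ ((pvInnerA p (k : Int)
              (PySem.List.pyRange 1 (min ((k : Int) + 1) ((p.length : Int) - (k : Int) - 1)) 1)
              (allowed - pvHam p[k] p[k + 1])).2 = false ∧
              (pvInnerA p (k : Int)
              (PySem.List.pyRange 1 (min ((k : Int) + 1) ((p.length : Int) - (k : Int) - 1)) 1)
              (allowed - pvHam p[k] p[k + 1])).1 = 0) := by
            rw [pvInnerA_spec p (k : Int) _ _ (by omega)]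
            rw [← hgk, ← hgk1, ← hd0, ← hS]
            omega
          rw [if_neg hinner]
          exact ihk

-- ===== VERDICT (by name: the statement is the Claim_ definition above) =====
theorem find_reflection_spec : Claim_equal_find_reflection := by
  intro pattern allowed _ _
  unfold Spec_find_reflection find_reflection find_reflection_alt
  have h := pvOuter_eq_scan pattern allowed pattern.length 0 rfl
  simpa using h
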